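-- pv_equiv track=rewrite | github.com/xidui/funba | social_media/instagram/post.py | _paths_by_priority
-- ===== SOURCE A (Python) =====
-- _IMAGE_SLOT_PRIORITY = ("poster_ig", "instagram", "poster", "img1", "img2", "img3")
--
-- def _paths_by_priority(rows: list[tuple[str, str]]) -> list[str]:
--     paths: list[str] = []
--     seen: set[str] = set()
--
--     def append_path(path: str) -> None:
--         candidate = str(path or "").strip()
--         if candidate and candidate not in seen:
--             seen.add(candidate)
--             paths.append(candidate)
--
--     by_slot: dict[str, list[str]] = {}
--     for slot, path in rows:
--         by_slot.setdefault(slot, []).append(path)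
--
--     for slot in _IMAGE_SLOT_PRIORITY:
--         for path in by_slot.get(slot, []):
--             append_path(path)
--     for _slot, path in rows:
--         append_path(path)
--     return paths
-- ===== SOURCE B (Python) =====
-- _IMAGE_SLOT_PRIORITY = ("poster_ig", "instagram", "poster", "img1", "img2", "img3")
--
-- def _paths_by_priority(rows: list[tuple[str, str]]) -> list[str]:
--     rank = {slot: i for i, slot in enumerate(_IMAGE_SLOT_PRIORITY)}
--     default = len(_IMAGE_SLOT_PRIORITY)
--     ordered = sorted(rows, key=lambda r: rank.get(r[0], default))
--     result: list[str] = []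
--     seen: set[str] = set()
--     for _slot, path in ordered:
--         candidate = str(path or "").strip()
--         if candidate and candidate not in seen:
--             seen.add(candidate)
--             result.append(candidate)
--     return result
-- ===== Notes on version B (the rewrite author's own statement) =====
-- stated objective: simpler
-- what changed: Replaces the dict-grouping plus priority-loop plus second full dedup scan with a single stable sort of the rows by slot rank followed by one strip/dedup pass.
import Mathlib
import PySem

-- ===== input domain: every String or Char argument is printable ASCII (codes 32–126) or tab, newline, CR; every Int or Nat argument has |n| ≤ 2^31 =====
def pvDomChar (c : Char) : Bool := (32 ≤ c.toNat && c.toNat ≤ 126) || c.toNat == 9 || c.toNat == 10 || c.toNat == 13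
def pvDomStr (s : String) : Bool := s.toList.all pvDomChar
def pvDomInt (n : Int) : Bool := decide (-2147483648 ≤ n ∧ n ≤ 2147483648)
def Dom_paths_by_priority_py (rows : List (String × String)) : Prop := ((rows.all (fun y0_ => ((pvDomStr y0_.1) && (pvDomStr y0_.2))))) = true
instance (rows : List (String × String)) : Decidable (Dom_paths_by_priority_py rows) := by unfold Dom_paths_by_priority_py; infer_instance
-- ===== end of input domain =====

-- B replaces A's dict-grouping + priority-loop + second full scan by one stable sort of the
-- rows by slot rank followed by a single strip/dedup pass (objective: simpler; return value only).

-- _IMAGE_SLOT_PRIORITY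
def pvPrio : List String := ["poster_ig", "instagram", "poster", "img1", "img2", "img3"]

-- ===== PORT A =====
-- A's nested 'append_path': state is (paths, seen); str(path or "").strip() = path.strip() since path is a str
def pvAppendPath (st : List String × PySem.Set String) (path : String) : List String × PySem.Set String :=
  let candidate := PySem.Str.strip path
  if candidate ≠ "" ∧ PySem.Set.contains st.2 candidate = false then
    (st.1 ++ [candidate], PySem.Set.add st.2 candidate)
  else st

def paths_by_priority_py (rows : List (String × String)) : List String :=
  -- by_slot.setdefault(slot, []).append(path)  =  modify slot [] (· ++ [path])
  let bySlot : PySem.Dict String (List String) :=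
    rows.foldl (fun d r => d.modify r.1 [] (fun l => l ++ [r.2])) PySem.Dict.empty
  let st1 := pvPrio.foldl (fun st slot => (bySlot.getD slot []).foldl pvAppendPath st)
    (([] : List String), (PySem.Set.empty : PySem.Set String))
  (rows.foldl (fun st r => pvAppendPath st r.2) st1).1

-- ===== PORT B =====
-- rank = {slot: i for i, slot in enumerate(_IMAGE_SLOT_PRIORITY)}
def pvRankDict : PySem.Dict String Int :=
  PySem.Dict.ofList ((PySem.List.enumerate pvPrio).map (fun p => (p.2, p.1)))

def paths_by_priority_py_alt (rows : List (String × String)) : List String :=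
  let dflt : Int := (pvPrio.length : Int)
  let ordered := PySem.List.sorted rows (fun r => pvRankDict.getD r.1 dflt)
  (ordered.foldl (fun st r =>
      let candidate := PySem.Str.strip r.2
      if candidate ≠ "" ∧ PySem.Set.contains st.2 candidate = false then
        (st.1 ++ [candidate], PySem.Set.add st.2 candidate)
      else st)
    (([] : List String), (PySem.Set.empty : PySem.Set String))).1

-- ===== PRECONDITION & SPEC =====
def Spec_paths_by_priority_py (rows : List (String × String)) (out : List String) : Prop := out = paths_by_priority_py_alt rows
instance (rows : List (String × String)) (out : List String) : Decidable (Spec_paths_by_priority_py rows out) := by unfold Spec_paths_by_priority_py; infer_instance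

-- ===== CLAIM (what is proved, stated in full; the proofs are below) =====
def Claim_equal_paths_by_priority_py : Prop := ∀ (rows : List (String × String)), Dom_paths_by_priority_py rows → Spec_paths_by_priority_py rows (paths_by_priority_py rows)

-- ===== LEMMAS AND PROOFS =====

-- the dedup pass with the 'seen' set collapsed away (seen always equals the result list)
def pvStep (acc : List String) (p : String) : List String :=
  if PySem.Str.strip p ≠ "" ∧ acc.contains (PySem.Str.strip p) = false then acc ++ [PySem.Str.strip p] else acc

def pvG (acc : List String) (l : List String) : List String := l.foldl pvStep acc

-- B's sort key
def pvKey (r : String × String) : Int := pvRankDict.getD r.1 (pvPrio.length : Int)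

set_option maxRecDepth 4096 in
lemma pvKey_def (r : String × String) : pvKey r =
    (if r.1 == "poster_ig" then 0 else if r.1 == "instagram" then 1 else
     if r.1 == "poster" then 2 else if r.1 == "img1" then 3 else
     if r.1 == "img2" then 4 else if r.1 == "img3" then 5 else 6) := by
  show (PySem.Dict.mk [("poster_ig",0),("instagram",1),("poster",2),("img1",3),("img2",4),("img3",5)]).getD r.1 6 = _
  simp only [PySem.Dict.getD, PySem.Dict.get?_mk_cons]
  split_ifs <;> simp_all [BEq.comm, PySem.Dict.get?]

lemma pvKey_mem (r : String × String) : pvKey r ∈ ([0,1,2,3,4,5,6] : List Int) := by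
  rw [pvKey_def]; split_ifs <;> simp

lemma pvStep_mem {a : String} (acc : List String) (p : String) (h : a ∈ acc) : a ∈ pvStep acc p := by
  unfold pvStep; split_ifs <;> simp [h]

lemma pvStep_covered {p : String} (acc : List String)
    (h : PySem.Str.strip p = "" ∨ PySem.Str.strip p ∈ acc) : pvStep acc p = acc := by
  unfold pvStep; split_ifs with hc
  · rcases h with h | h
    · exact absurd h hc.1
    · exact absurd h (by simpa using hc.2)
  · rfl

-- (paths, seen) collapses to a single list
lemma pvCollapse (l : List String) (acc : List String) :
    l.foldl pvAppendPath (acc, acc) = (pvG acc l, pvG acc l) := by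
  induction l generalizing acc with
  | nil => rfl
  | cons p t ih =>
    show List.foldl pvAppendPath (pvAppendPath (acc, acc) p) t = _
    have hstep : pvAppendPath (acc, acc) p = (pvStep acc p, pvStep acc p) := by
      simp only [pvAppendPath, pvStep, PySem.Set.contains, PySem.Set.add]
      split_ifs with h h2 <;> simp_all
    rw [hstep, ih]
    rfl

-- accumulated results are never removed
lemma pvG_mono {a : String} (l : List String) (acc : List String) (h : a ∈ acc) : a ∈ pvG acc l := by
  induction l generalizing acc with
  | nil => exact h
  | cons p t ih => exact ih _ (pvStep_mem acc p h)

-- after processing l, every non-empty stripped candidate of l is in the result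
lemma pvG_covers {p : String} (l : List String) (acc : List String) (h : p ∈ l) :
    PySem.Str.strip p = "" ∨ PySem.Str.strip p ∈ pvG acc l := by
  induction l generalizing acc with
  | nil => cases h
  | cons q t ih =>
    rcases List.mem_cons.1 h with rfl | h
    · by_cases he : PySem.Str.strip p = ""
      · exact Or.inl he
      · refine Or.inr (pvG_mono t _ ?_)
        unfold pvStep; split_ifs with hc
        · simp
        · rcases not_and_or.1 hc with hc | hc
          · exact absurd he (by simpa using hc)
          · exact List.contains_iff_mem.1 (by simpa using hc)
    · exact ih _ h

lemma pvG_append (acc : List String) (l₁ l₂ : List String) :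
    pvG (pvG acc l₁) l₂ = pvG acc (l₁ ++ l₂) := (List.foldl_append).symm

-- rows whose candidate is already covered may be dropped from the pass
lemma pvG_skip (rows : List (String × String)) (acc : List String) (P : String × String → Bool)
    (h : ∀ r ∈ rows, P r = true → PySem.Str.strip r.2 = "" ∨ PySem.Str.strip r.2 ∈ acc) :
    pvG acc (rows.map Prod.snd) = pvG acc ((rows.filter (fun r => !P r)).map Prod.snd) := by
  induction rows generalizing acc with
  | nil => rfl
  | cons r t ih =>
    by_cases hp : P r = true
    · have hz : pvStep acc r.2 = acc := pvStep_covered acc (h r (List.mem_cons_self) hp)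
      have := ih acc (fun r' hr' => h r' (List.mem_cons_of_mem _ hr'))
      simpa [pvG, hp, hz] using this
    · have := ih (pvStep acc r.2) (fun r' hr' hP => by
        rcases h r' (List.mem_cons_of_mem _ hr') hP with h1 | h1
        · exact Or.inl h1
        · exact Or.inr (pvStep_mem _ _ h1))
      simpa [pvG, hp] using this

-- stable insertion places x after the not-before prefix and before the before suffix
lemma pvInsertBy_append (before : (String × String) → (String × String) → Bool)
    (x : String × String) (l₁ l₂ : List (String × String))
    (h1 : ∀ y ∈ l₁, before x y = false) (h2 : ∀ y ∈ l₂, before x y = true) :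
    PySem.List.insertBy before x (l₁ ++ l₂) = l₁ ++ x :: l₂ := by
  induction l₁ with
  | nil =>
    cases l₂ with
    | nil => rfl
    | cons y t => simp [PySem.List.insertBy, h2 y (List.mem_cons_self)]
  | cons a t ih =>
    have ha : before x a = false := h1 a (List.mem_cons_self)
    simp [PySem.List.insertBy, ha]
    exact ih (fun y hy => h1 y (List.mem_cons_of_mem _ hy))

-- the stable sort by a key whose values lie in a strictly increasing rank list is the
-- concatenation of the per-rank filters, in rank order
lemma pvSortedBuckets (key : String × String → Int) (ranks : List Int) (hs : ranks.Pairwise (· < ·))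
    (rows : List (String × String)) (hall : ∀ r ∈ rows, key r ∈ ranks) :
    PySem.List.sorted rows key = ranks.flatMap (fun i => rows.filter (fun r => key r == i)) := by
  induction rows using List.reverseRecOn with
  | nil => simp [PySem.List.sorted_eq_foldl_insertBy]
  | append_singleton t r ih =>
    have ht : ∀ x ∈ t, key x ∈ ranks := fun x hx => hall x (by simp [hx])
    have hsort : PySem.List.sorted (t ++ [r]) key =
        PySem.List.insertBy (fun a b => decide (key a < key b)) r (PySem.List.sorted t key) := by
      rw [PySem.List.sorted_eq_foldl_insertBy, PySem.List.sorted_eq_foldl_insertBy, List.foldl_append]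
      rfl
    obtain ⟨l₁, l₂, hsplit⟩ := List.append_of_mem (hall r (by simp))
    have hlt1 : ∀ i ∈ l₁, i < key r := fun i hi =>
      (List.pairwise_append.1 (hsplit ▸ hs)).2.2 i hi (key r) (by simp)
    have hlt2 : ∀ i ∈ l₂, key r < i := fun i hi =>
      (List.pairwise_cons.1 (List.pairwise_append.1 (hsplit ▸ hs)).2.1).1 i hi
    rw [hsort, ih ht, hsplit]
    have hfilter_ne : ∀ i : Int, i ≠ key r →
        List.filter (fun x => key x == i) (t ++ [r]) = List.filter (fun x => key x == i) t := by
      intro i hi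
      rw [List.filter_append]
      simp [(by simpa using hi.symm : ¬key r == i)]
    have hfilter_eq : List.filter (fun x => key x == key r) (t ++ [r])
        = List.filter (fun x => key x == key r) t ++ [r] := by
      rw [List.filter_append]; simp
    rw [List.flatMap_append, List.flatMap_cons, List.flatMap_append, List.flatMap_cons]
    have h1' : ∀ y ∈ (l₁.flatMap (fun i => t.filter (fun x => key x == i)))
        ++ (t.filter (fun x => key x == key r)),
        (fun a b => decide (key a < key b)) r y = false := by
      intro y hy
      rcases List.mem_append.1 hy with hy | hy
      · obtain ⟨i, hi, hyf⟩ := List.mem_flatMap.1 hy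
        have : key y = i := by simpa using (List.mem_filter.1 hyf).2
        simp [this]
        exact le_of_lt (hlt1 i hi)
      · have : key y = key r := by simpa using (List.mem_filter.1 hy).2
        simp [this]
    have h2' : ∀ y ∈ l₂.flatMap (fun i => t.filter (fun x => key x == i)),
        (fun a b => decide (key a < key b)) r y = true := by
      intro y hy
      obtain ⟨i, hi, hyf⟩ := List.mem_flatMap.1 hy
      have : key y = i := by simpa using (List.mem_filter.1 hyf).2
      simp [this]
      exact hlt2 i hi
    have hins := pvInsertBy_append (fun a b => decide (key a < key b)) r
      ((l₁.flatMap (fun i => t.filter (fun x => key x == i))) ++ (t.filter (fun x => key x == key r)))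
      (l₂.flatMap (fun i => t.filter (fun x => key x == i))) h1' h2'
    rw [List.append_assoc] at hins
    rw [hins]
    have e1 : l₁.flatMap (fun i => (t ++ [r]).filter (fun x => key x == i))
        = l₁.flatMap (fun i => t.filter (fun x => key x == i)) := by
      simp only [List.flatMap]
      exact congrArg List.flatten (List.map_congr_left
        (fun i hi => hfilter_ne i (ne_of_lt (hlt1 i hi))))
    have e2 : l₂.flatMap (fun i => (t ++ [r]).filter (fun x => key x == i))
        = l₂.flatMap (fun i => t.filter (fun x => key x == i)) := by
      simp only [List.flatMap]
      exact congrArg List.flatten (List.map_congr_left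
        (fun i hi => hfilter_ne i (ne_of_gt (hlt2 i hi))))
    rw [e1, e2, hfilter_eq]
    simp

lemma pvModify_getD (d : PySem.Dict String (List String)) (k' k : String) (f : List String → List String) :
    (d.modify k' [] f).getD k [] = if k = k' then f (d.getD k' []) else d.getD k [] := by
  simp only [PySem.Dict.modify, PySem.Dict.getD_insert]

-- by_slot.get(slot, []) is the slot's paths in row order
lemma pvBySlot_getD (rows : List (String × String)) (k : String) :
    ((rows.foldl (fun d r => d.modify r.1 [] (fun l => l ++ [r.2])) PySem.Dict.empty).getD k [])
      = (rows.filter (fun r => r.1 == k)).map Prod.snd := by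
  induction rows using List.reverseRecOn with
  | nil => rfl
  | append_singleton t r ih =>
    rw [List.foldl_append, List.foldl_cons, List.foldl_nil, pvModify_getD,
      List.filter_append, List.map_append]
    by_cases hk : k = r.1
    · have hb : (r.1 == k) = true := by simp [hk]
      rw [if_pos hk, ← hk, ih]
      simp [hb]
    · have hb : (r.1 == k) = false := by simp; exact fun h => hk h.symm
      rw [if_neg hk, ih]
      simp [hb]

lemma pvOuter (rows : List (String × String)) (st : List String × PySem.Set String) :
    rows.foldl (fun st r => pvAppendPath st r.2) st = List.foldl pvAppendPath st (rows.map Prod.snd) :=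
  (List.foldl_map).symm

lemma pvA_eq (rows : List (String × String)) : paths_by_priority_py rows =
    pvG (pvG (pvG (pvG (pvG (pvG (pvG []
      ((rows.filter (fun r => r.1 == "poster_ig")).map Prod.snd))
      ((rows.filter (fun r => r.1 == "instagram")).map Prod.snd))
      ((rows.filter (fun r => r.1 == "poster")).map Prod.snd))
      ((rows.filter (fun r => r.1 == "img1")).map Prod.snd))
      ((rows.filter (fun r => r.1 == "img2")).map Prod.snd))
      ((rows.filter (fun r => r.1 == "img3")).map Prod.snd))
      (rows.map Prod.snd) := by
  simp only [paths_by_priority_py]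
  rw [show (([] : List String), (PySem.Set.empty : PySem.Set String)) = (([] : List String), ([] : List String)) from rfl]
  simp only [pvPrio, List.foldl_cons, List.foldl_nil, pvBySlot_getD]
  rw [pvOuter, pvCollapse, pvCollapse, pvCollapse, pvCollapse, pvCollapse, pvCollapse, pvCollapse]

lemma pvB_eq (rows : List (String × String)) : paths_by_priority_py_alt rows =
    pvG [] ((([0,1,2,3,4,5,6] : List Int).flatMap
      (fun i => rows.filter (fun r => pvKey r == i))).map Prod.snd) := by
  simp only [paths_by_priority_py_alt]
  rw [show (fun (st : List String × PySem.Set String) (r : String × String) =>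
      let candidate := PySem.Str.strip r.2;
      if candidate ≠ "" ∧ PySem.Set.contains st.2 candidate = false then
        (st.1 ++ [candidate], PySem.Set.add st.2 candidate)
      else st) = (fun st r => pvAppendPath st r.2) from rfl]
  rw [show (fun r : String × String => pvRankDict.getD r.1 ((pvPrio.length : Nat) : Int)) = pvKey from rfl]
  rw [pvSortedBuckets pvKey [0,1,2,3,4,5,6] (by decide) rows (fun r _ => pvKey_mem r)]
  rw [show (([] : List String), (PySem.Set.empty : PySem.Set String)) = (([] : List String), ([] : List String)) from rfl]
  rw [pvOuter, pvCollapse]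

-- ===== VERDICT (by name: the statement is the Claim_ definition above) =====
theorem paths_by_priority_py_spec : Claim_equal_paths_by_priority_py := by
  intro rows _
  unfold Spec_paths_by_priority_py
  rw [pvA_eq, pvB_eq]
  have f0 : rows.filter (fun r => pvKey r == (0 : Int)) = rows.filter (fun r => r.1 == "poster_ig") :=
    List.filter_congr (fun r _ => by rw [pvKey_def]; split_ifs <;> simp_all)
  have f1 : rows.filter (fun r => pvKey r == (1 : Int)) = rows.filter (fun r => r.1 == "instagram") :=
    List.filter_congr (fun r _ => by rw [pvKey_def]; split_ifs <;> simp_all)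
  have f2 : rows.filter (fun r => pvKey r == (2 : Int)) = rows.filter (fun r => r.1 == "poster") :=
    List.filter_congr (fun r _ => by rw [pvKey_def]; split_ifs <;> simp_all)
  have f3 : rows.filter (fun r => pvKey r == (3 : Int)) = rows.filter (fun r => r.1 == "img1") :=
    List.filter_congr (fun r _ => by rw [pvKey_def]; split_ifs <;> simp_all)
  have f4 : rows.filter (fun r => pvKey r == (4 : Int)) = rows.filter (fun r => r.1 == "img2") :=
    List.filter_congr (fun r _ => by rw [pvKey_def]; split_ifs <;> simp_all)
  have f5 : rows.filter (fun r => pvKey r == (5 : Int)) = rows.filter (fun r => r.1 == "img3") :=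
    List.filter_congr (fun r _ => by rw [pvKey_def]; split_ifs <;> simp_all)
  have f6 : rows.filter (fun r => pvKey r == (6 : Int)) = rows.filter (fun r => !pvPrio.contains r.1) :=
    List.filter_congr (fun r _ => by rw [pvKey_def]; split_ifs <;> simp_all [pvPrio])
  simp only [List.flatMap_cons, List.flatMap_nil, List.append_nil, List.map_append]
  rw [f0, f1, f2, f3, f4, f5, f6]
  rw [← pvG_append, ← pvG_append, ← pvG_append, ← pvG_append, ← pvG_append, ← pvG_append]
  set X := pvG (pvG (pvG (pvG (pvG (pvG []
      ((rows.filter (fun r => r.1 == "poster_ig")).map Prod.snd))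
      ((rows.filter (fun r => r.1 == "instagram")).map Prod.snd))
      ((rows.filter (fun r => r.1 == "poster")).map Prod.snd))
      ((rows.filter (fun r => r.1 == "img1")).map Prod.snd))
      ((rows.filter (fun r => r.1 == "img2")).map Prod.snd))
      ((rows.filter (fun r => r.1 == "img3")).map Prod.snd) with hXdef
  have hcov : ∀ r ∈ rows, (pvPrio.contains r.1) = true →
      PySem.Str.strip r.2 = "" ∨ PySem.Str.strip r.2 ∈ X := by
    intro r hr hc
    have hmem : r.1 ∈ pvPrio := List.contains_iff_mem.1 hc
    have hX2 : X = pvG []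
        (((rows.filter (fun r => r.1 == "poster_ig")).map Prod.snd) ++
         (((rows.filter (fun r => r.1 == "instagram")).map Prod.snd) ++
          (((rows.filter (fun r => r.1 == "poster")).map Prod.snd) ++
           (((rows.filter (fun r => r.1 == "img1")).map Prod.snd) ++
            (((rows.filter (fun r => r.1 == "img2")).map Prod.snd) ++
             ((rows.filter (fun r => r.1 == "img3")).map Prod.snd)))))) := by
      rw [hXdef]
      simp only [pvG_append, List.append_assoc]
    rw [hX2]
    simp only [pvPrio, List.mem_cons, List.not_mem_nil, or_false] at hmem
    rcases hmem with h | h | h | h | h | h <;>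
    · refine pvG_covers _ _ ?_
      simp only [List.mem_append, List.mem_map, List.mem_filter, beq_iff_eq]
      first
      | exact Or.inl ⟨r, ⟨hr, h⟩, rfl⟩
      | exact Or.inr (Or.inl ⟨r, ⟨hr, h⟩, rfl⟩)
      | exact Or.inr (Or.inr (Or.inl ⟨r, ⟨hr, h⟩, rfl⟩))
      | exact Or.inr (Or.inr (Or.inr (Or.inl ⟨r, ⟨hr, h⟩, rfl⟩)))
      | exact Or.inr (Or.inr (Or.inr (Or.inr (Or.inl ⟨r, ⟨hr, h⟩, rfl⟩))))
      | exact Or.inr (Or.inr (Or.inr (Or.inr (Or.inr ⟨r, ⟨hr, h⟩, rfl⟩))))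
  have hskip := pvG_skip rows X (fun r => pvPrio.contains r.1) hcov
  rw [hskip]
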